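-- pv_equiv track=rewrite | github.com/Alexwell/algorithms | algorithms/graph_weight.py | inner_keys_chacking
-- ===== SOURCE A (Python) =====
-- def inner_keys_chacking(main_dict, checker):
--     tmp = []
--     for i in main_dict:
--         for j in main_dict[i]:
--             tmp.append(j)
--     set(tmp)
--     for i in tmp:
--         if i not in checker: return True
-- ===== SOURCE B (Python) =====
-- def inner_keys_chacking(main_dict, checker):
--     index = sorted(set(checker))
--
--     def found(key):
--         lo, hi = 0, len(index)
--         while lo < hi:
--             mid = (lo + hi) // 2
--             if index[mid] < key:
--                 lo = mid + 1
--             elif key < index[mid]: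
--                 hi = mid
--             else:
--                 return True
--         return False
--
--     for inner in main_dict.values():
--         for key in inner:
--             if not found(key):
--                 return True
-- ===== Notes on version B (the rewrite author's own statement) =====
-- stated objective: alternative
-- what changed: Instead of A's flat tmp list scanned with linear 'in checker' membership, B sorts the deduplicated checker once and decides each inner key's membership by binary search over that sorted index, streaming through the nested dicts with an early return.
import Mathlib
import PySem

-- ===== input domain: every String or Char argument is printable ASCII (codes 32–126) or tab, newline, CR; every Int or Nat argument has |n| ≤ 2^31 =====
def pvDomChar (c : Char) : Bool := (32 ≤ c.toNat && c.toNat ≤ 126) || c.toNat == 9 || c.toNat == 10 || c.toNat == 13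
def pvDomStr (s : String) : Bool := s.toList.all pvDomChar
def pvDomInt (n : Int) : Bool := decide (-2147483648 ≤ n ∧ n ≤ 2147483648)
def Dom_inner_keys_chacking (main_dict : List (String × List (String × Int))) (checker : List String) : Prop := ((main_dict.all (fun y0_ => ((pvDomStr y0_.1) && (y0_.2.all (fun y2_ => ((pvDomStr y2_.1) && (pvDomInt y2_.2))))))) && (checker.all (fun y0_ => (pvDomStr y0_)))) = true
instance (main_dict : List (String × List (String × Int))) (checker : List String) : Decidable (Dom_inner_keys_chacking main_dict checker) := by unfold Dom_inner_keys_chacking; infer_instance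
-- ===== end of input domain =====

-- B replaces A's flat-tmp-list-plus-linear-membership-scan by sorting the deduplicated checker once
-- and binary-searching each inner key in that sorted index while streaming through the nested dicts
-- (alternative algorithm; same return value, True or the implicit None).
-- Both ports model the dict parameter as PySem.Dict.ofList main_dict (duplicate outer keys collapse,
-- last value wins); inner dict keys are the value lists' first components (only membership matters
-- for the result, so dedup of inner keys is irrelevant).

-- ===== PORT A =====
-- second loop of A: 'for i in tmp: if i not in checker: return True' (implicit None at the end)
def innerScanA : List String → List String → Option Bool
  | [], _ => none
  | i :: rest, checker => if checker.contains i then innerScanA rest checker else some true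

def inner_keys_chacking (main_dict : List (String × List (String × Int))) (checker : List String) : Option Bool :=
  let d := PySem.Dict.ofList main_dict
  -- tmp = []; for i in main_dict: for j in main_dict[i]: tmp.append(j)   ('set(tmp)' is discarded in A)
  let tmp := d.items.foldl (fun acc p => acc ++ p.2.map Prod.fst) []
  innerScanA tmp checker

-- ===== PORT B =====
-- 'found(key)': the while lo < hi binary-search loop, recursion on hi - lo
def bFound (index : List String) (key : String) (lo hi : Nat) : Bool :=
  if _h : lo < hi then
    let mid := (lo + hi) / 2
    if index.getD mid "" < key then bFound index key (mid + 1) hi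
    else if key < index.getD mid "" then bFound index key lo mid
    else true
  else false
termination_by hi - lo
decreasing_by all_goals omega

-- 'for key in inner: if not found(key): return True'
def scanKeysB (index : List String) : List String → Bool
  | [] => false
  | k :: rest => if bFound index k 0 index.length then scanKeysB index rest else true

-- 'for inner in main_dict.values(): …' (implicit None at the end)
def scanValsB (index : List String) : List (List (String × Int)) → Option Bool
  | [] => none
  | v :: rest => if scanKeysB index (v.map Prod.fst) then some true else scanValsB index rest

def inner_keys_chacking_alt (main_dict : List (String × List (String × Int))) (checker : List String) : Option Bool :=
  let index := PySem.List.sorted (PySem.Set.ofList checker) (fun x => x)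
  scanValsB index ((PySem.Dict.ofList main_dict).values)

-- ===== PRECONDITION & SPEC =====
def Spec_inner_keys_chacking (main_dict : List (String × List (String × Int))) (checker : List String) (out : Option Bool) : Prop := out = inner_keys_chacking_alt main_dict checker
instance (main_dict : List (String × List (String × Int))) (checker : List String) (out : Option Bool) : Decidable (Spec_inner_keys_chacking main_dict checker out) := by unfold Spec_inner_keys_chacking; infer_instance

-- ===== CLAIM (what is proved, stated in full; the proofs are below) =====
def Claim_equal_inner_keys_chacking : Prop := ∀ (main_dict : List (String × List (String × Int))) (checker : List String), Dom_inner_keys_chacking main_dict checker → Spec_inner_keys_chacking main_dict checker (inner_keys_chacking main_dict checker)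

-- ===== LEMMAS AND PROOFS =====

-- A's scan returns some true iff some element is missing from checker, else none.
theorem innerScanA_eq (tmp checker : List String) :
    innerScanA tmp checker = if tmp.any (fun i => !checker.contains i) then some true else none := by
  induction tmp with
  | nil => simp [innerScanA]
  | cons i rest ih =>
    simp only [innerScanA, List.any_cons, ih]
    by_cases h : i ∈ checker <;> simp [h]

-- binary search finds key iff it occurs in the searched window of a (≤-)sorted list
theorem bFound_iff (index : List String) (key : String) (lo hi : Nat)
    (hs : index.Pairwise (· ≤ ·)) (hhi : hi ≤ index.length) :
    bFound index key lo hi = true ↔ ∃ i, lo ≤ i ∧ ∃ h : i < hi, index[i]'(by omega) = key := by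
  induction lo, hi using bFound.induct index key with
  | case1 lo hi h mid h1 ih =>
    rw [bFound]
    simp only [h, dif_pos]
    have hmid : lo ≤ mid ∧ mid < hi := by constructor <;> omega
    have hmlen : mid < index.length := by omega
    have hget : index.getD mid "" = index[mid] := List.getD_eq_getElem index "" hmlen
    rw [if_pos h1, ih hhi]
    constructor
    · rintro ⟨i, hle, hlt, heq⟩; exact ⟨i, by omega, hlt, heq⟩
    · rintro ⟨i, hle, hlt, heq⟩
      refine ⟨i, ?_, hlt, heq⟩
      by_contra hcon
      have hile : i ≤ mid := by omega
      have hmono : index[i] ≤ index[mid] := by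
        rcases Nat.lt_or_ge i mid with hl | hg
        · exact (List.pairwise_iff_getElem.mp hs) i mid (by omega) hmlen hl
        · have : i = mid := by omega
          subst this; exact le_refl _
      rw [heq] at hmono
      exact absurd (hget ▸ h1) (not_lt.mpr hmono)
  | case2 lo hi h mid h1 h2 ih =>
    rw [bFound]
    simp only [h, dif_pos]
    have hmlen : mid < index.length := by omega
    have hget : index.getD mid "" = index[mid] := List.getD_eq_getElem index "" hmlen
    rw [if_neg h1, if_pos h2, ih (by omega)]
    constructor
    · rintro ⟨i, hle, hlt, heq⟩; exact ⟨i, hle, by omega, heq⟩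
    · rintro ⟨i, hle, hlt, heq⟩
      refine ⟨i, hle, ?_, heq⟩
      by_contra hcon
      have hmi : mid ≤ i := by omega
      have hmono : index[mid] ≤ index[i]'(by omega) := by
        rcases Nat.lt_or_ge mid i with hl | hg
        · exact (List.pairwise_iff_getElem.mp hs) mid i hmlen (by omega) hl
        · have : mid = i := by omega
          subst this; exact le_refl _
      rw [heq] at hmono
      rw [hget] at h2
      exact absurd h2 (not_lt.mpr hmono)
  | case3 lo hi h mid h1 h2 =>
    rw [bFound]
    simp only [h, dif_pos]
    rw [if_neg h1, if_neg h2]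
    have hmlen : mid < index.length := by omega
    have hget : index.getD mid "" = index[mid] := List.getD_eq_getElem index "" hmlen
    have heq : index[mid] = key := by
      rw [hget] at h1 h2
      exact le_antisymm (not_lt.mp h2) (not_lt.mp h1)
    simp only [true_iff]
    exact ⟨mid, by omega, by omega, heq⟩
  | case4 lo hi h =>
    rw [bFound]
    rw [dif_neg h]
    constructor
    · intro hc; exact absurd hc (by simp)
    · rintro ⟨i, hle, hlt, _⟩; omega

-- over the whole sorted index, binary search is membership
theorem bFound_mem (index : List String) (key : String) (hs : index.Pairwise (· ≤ ·)) :
    bFound index key 0 index.length = true ↔ key ∈ index := by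
  rw [bFound_iff index key 0 index.length hs (le_refl _)]
  constructor
  · rintro ⟨i, _, hlt, heq⟩; exact heq ▸ List.getElem_mem hlt
  · intro hmem
    obtain ⟨i, hlt, heq⟩ := List.mem_iff_getElem.mp hmem
    exact ⟨i, Nat.zero_le _, hlt, heq⟩

-- B's inner loop is an any over the keys
theorem scanKeysB_eq (index : List String) (ks : List String) (hs : index.Pairwise (· ≤ ·)) :
    scanKeysB index ks = ks.any (fun k => !index.contains k) := by
  induction ks with
  | nil => simp [scanKeysB]
  | cons k rest ih =>
    simp only [scanKeysB, List.any_cons, ih]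
    by_cases h : k ∈ index
    · rw [if_pos ((bFound_mem index k hs).mpr h)]; simp [h]
    · rw [if_neg (fun hc => h ((bFound_mem index k hs).mp hc))]; simp [h]

-- B's outer loop, with the inner loop already rewritten to an any
theorem scanValsB_eq (index : List String) (vals : List (List (String × Int)))
    (hs : index.Pairwise (· ≤ ·)) :
    scanValsB index vals =
      if (vals.flatMap (fun v => v.map Prod.fst)).any (fun k => !index.contains k)
      then some true else none := by
  induction vals with
  | nil => simp [scanValsB]
  | cons v rest ih =>
    simp only [scanValsB, scanKeysB_eq index _ hs, ih, List.flatMap_cons, List.any_append]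
    cases hv : (v.map Prod.fst).any (fun k => !index.contains k) with
    | false => rw [Bool.false_or]; simp
    | true => simp

theorem inner_keys_chacking_spec : Claim_equal_inner_keys_chacking := by
  intro main_dict checker _
  unfold Spec_inner_keys_chacking inner_keys_chacking inner_keys_chacking_alt
  have hs : (PySem.List.sorted (PySem.Set.ofList checker) (fun x => x)).Pairwise (· ≤ ·) :=
    (PySem.List.sorted_ofList_pairwise_lt checker).imp (fun h => le_of_lt h)
  rw [scanValsB_eq _ _ hs, innerScanA_eq]
  simp only [PySem.Dict.values, PySem.List.foldl_append_eq_flatMap, List.nil_append, List.flatMap_map]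
  have hpred :
      ((PySem.Dict.ofList main_dict).items.flatMap (fun p => p.2.map Prod.fst)).any
          (fun k => !(PySem.List.sorted (PySem.Set.ofList checker) (fun x => x)).contains k)
        = ((PySem.Dict.ofList main_dict).items.flatMap (fun p => p.2.map Prod.fst)).any
          (fun i => !checker.contains i) :=
    List.any_congr rfl (fun a => by
      by_cases h : a ∈ checker <;> simp [PySem.List.mem_sorted, PySem.Set.mem_ofList, h])
  rw [hpred]

-- ===== VERDICT (by name: the statement is the Claim_ definition above) =====
-- (theorem inner_keys_chacking_spec is proved above)
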